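-- pv_equiv track=rewrite | github.com/angelikang/UnderstandingComplexGroupInteractionsFromVideos | person.py | includePoints
-- ===== SOURCE A (Python) =====
-- def includePoints(bb, points):
--     left, top, right, bottom = bb
--
--     for x, y, c in points:
--         if c > 0:
--             top = min(top, y)
--             bottom = max(bottom, y)
--             left = min(left, x)
--             right = max(right, x)
--
--     return (left, top, right, bottom)
-- ===== SOURCE B (Python) =====
-- def includePoints(bb, points):
--     left, top, right, bottom = bb
--     xs = sorted(x for x, y, c in points if c > 0)
--     ys = sorted(y for x, y, c in points if c > 0)
--     if xs:
--         return (min(left, xs[0]), min(top, ys[0]),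
--                 max(right, xs[-1]), max(bottom, ys[-1]))
--     return (left, top, right, bottom)
-- ===== Notes on version B (the rewrite author's own statement) =====
-- stated objective: alternative
-- what changed: Instead of A's single pass maintaining four running min/max accumulators, B sorts the valid x- and y-coordinates once and reads each bound off an endpoint (first/last element) of the sorted lists, trading a linear scan for sort-then-endpoints.
import Mathlib
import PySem

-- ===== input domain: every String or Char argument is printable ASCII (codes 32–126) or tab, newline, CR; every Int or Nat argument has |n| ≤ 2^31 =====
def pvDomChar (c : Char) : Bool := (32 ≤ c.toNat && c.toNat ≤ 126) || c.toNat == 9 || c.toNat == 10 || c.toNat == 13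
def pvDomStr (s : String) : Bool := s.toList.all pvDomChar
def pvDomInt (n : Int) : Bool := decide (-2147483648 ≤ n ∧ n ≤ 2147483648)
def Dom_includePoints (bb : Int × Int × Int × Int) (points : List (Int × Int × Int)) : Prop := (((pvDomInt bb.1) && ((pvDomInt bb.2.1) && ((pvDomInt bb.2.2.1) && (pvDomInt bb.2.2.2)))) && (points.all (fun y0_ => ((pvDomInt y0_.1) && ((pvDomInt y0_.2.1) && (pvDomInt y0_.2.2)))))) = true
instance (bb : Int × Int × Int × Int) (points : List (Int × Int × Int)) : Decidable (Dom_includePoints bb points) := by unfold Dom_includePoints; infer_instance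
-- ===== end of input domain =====

-- B replaces A's four-accumulator scan by sorting the valid x- and y-coordinates and
-- reading each bound off an endpoint of the sorted lists (objective: alternative).

-- ===== PORT A =====
-- the loop body of A: update the four accumulators for one point
def includePointsStep (st : Int × Int × Int × Int) (p : Int × Int × Int) : Int × Int × Int × Int :=
  let (left, top, right, bottom) := st
  let (x, y, c) := p
  if c > 0 then (min left x, min top y, max right x, max bottom y)
  else (left, top, right, bottom)

def includePoints (bb : Int × Int × Int × Int) (points : List (Int × Int × Int)) : Int × Int × Int × Int :=
  let (left, top, right, bottom) := bb
  let st := points.foldl includePointsStep (left, top, right, bottom)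
  (st.1, st.2.1, st.2.2.1, st.2.2.2)

-- ===== PORT B =====
-- xs[0] / xs[-1] on the non-empty sorted list are ported as head?/getLast? with a default
def includePoints_alt (bb : Int × Int × Int × Int) (points : List (Int × Int × Int)) : Int × Int × Int × Int :=
  let (left, top, right, bottom) := bb
  let xs := PySem.List.sorted ((points.filter (fun p => p.2.2 > 0)).map (fun p => p.1)) (fun x => x) false
  let ys := PySem.List.sorted ((points.filter (fun p => p.2.2 > 0)).map (fun p => p.2.1)) (fun x => x) false
  if xs.isEmpty then (left, top, right, bottom)
  else (min left (xs.head?.getD 0), min top (ys.head?.getD 0),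
        max right (xs.getLast?.getD 0), max bottom (ys.getLast?.getD 0))

-- ===== PRECONDITION & SPEC =====
def Spec_includePoints (bb : Int × Int × Int × Int) (points : List (Int × Int × Int)) (out : Int × Int × Int × Int) : Prop := out = includePoints_alt bb points
instance (bb : Int × Int × Int × Int) (points : List (Int × Int × Int)) (out : Int × Int × Int × Int) : Decidable (Spec_includePoints bb points out) := by unfold Spec_includePoints; infer_instance

-- ===== CLAIM =====
def Claim_equal_includePoints : Prop := ∀ (bb : Int × Int × Int × Int) (points : List (Int × Int × Int)), Dom_includePoints bb points → Spec_includePoints bb points (includePoints bb points)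

-- ===== LEMMAS AND PROOFS =====
theorem includePoints_fold_eq (points : List (Int × Int × Int)) :
    ∀ (l t r b : Int),
      points.foldl includePointsStep (l, t, r, b) =
        (((points.filter (fun p => p.2.2 > 0)).map (fun p => p.1)).foldl min l,
         ((points.filter (fun p => p.2.2 > 0)).map (fun p => p.2.1)).foldl min t,
         ((points.filter (fun p => p.2.2 > 0)).map (fun p => p.1)).foldl max r,
         ((points.filter (fun p => p.2.2 > 0)).map (fun p => p.2.1)).foldl max b) := by
  induction points with
  | nil => intro l t r b; simp
  | cons p ps ih =>
    intro l t r b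
    obtain ⟨x, y, c⟩ := p
    by_cases hc : c > 0 <;> simp [includePointsStep, hc, ih]

theorem foldl_min_const : ∀ (zs : List Int) (a : Int), (∀ x ∈ zs, a ≤ x) → zs.foldl min a = a := by
  intro zs
  induction zs with
  | nil => intro a _; rfl
  | cons z t ih =>
    intro a h
    have hz : a ≤ z := h z (by simp)
    simp only [List.foldl_cons, min_eq_left hz]
    exact ih a (fun x hx => h x (by simp [hx]))

theorem foldl_max_const : ∀ (zs : List Int) (a : Int), (∀ x ∈ zs, x ≤ a) → zs.foldl max a = a := by
  intro zs
  induction zs with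
  | nil => intro a _; rfl
  | cons z t ih =>
    intro a h
    have hz : z ≤ a := h z (by simp)
    simp only [List.foldl_cons, max_eq_left hz]
    exact ih a (fun x hx => h x (by simp [hx]))

theorem foldl_min_sorted (zs : List Int) (a m : Int) (t : List Int)
    (h : PySem.List.sorted zs (fun x => x) false = m :: t) : zs.foldl min a = min a m := by
  have hp : (PySem.List.sorted zs (fun x => x) false).Perm zs := PySem.List.sorted_perm zs _ _
  rw [← hp.foldl_eq a, h, List.foldl_cons]
  have hpw := PySem.List.sorted_pairwise (key := fun x => x) zs
  rw [h, List.pairwise_cons] at hpw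
  exact foldl_min_const t (min a m) (fun x hx => le_trans (min_le_right a m) (hpw.1 x hx))

theorem foldl_max_sorted (zs : List Int) (a M : Int) (t : List Int)
    (h : (PySem.List.sorted zs (fun x => x) false).reverse = M :: t) : zs.foldl max a = max a M := by
  have hp : (PySem.List.sorted zs (fun x => x) false).reverse.Perm zs :=
    ((PySem.List.sorted zs (fun x => x) false).reverse_perm).trans (PySem.List.sorted_perm zs _ _)
  rw [← hp.foldl_eq a, h, List.foldl_cons]
  have hpw := PySem.List.sorted_pairwise (key := fun x => x) zs
  have hpw' : ((PySem.List.sorted zs (fun x => x) false).reverse).Pairwise (fun x y => y ≤ x) := by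
    rw [List.pairwise_reverse]; exact hpw
  rw [h, List.pairwise_cons] at hpw'
  exact foldl_max_const t (max a M) (fun x hx => le_trans (hpw'.1 x hx) (le_max_right a M))

-- ===== VERDICT =====
theorem includePoints_spec : Claim_equal_includePoints := by
  intro ⟨l, t, r, b⟩ points _
  unfold Spec_includePoints includePoints includePoints_alt
  simp only [includePoints_fold_eq]
  set xs0 := (points.filter (fun p => p.2.2 > 0)).map (fun p => p.1) with hxs0
  set ys0 := (points.filter (fun p => p.2.2 > 0)).map (fun p => p.2.1) with hys0
  cases hs : PySem.List.sorted xs0 (fun x => x) false with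
  | nil =>
    have hx : xs0 = [] := (PySem.List.sorted_eq_nil_iff _ _ _).mp hs
    have hfilter : points.filter (fun p => p.2.2 > 0) = [] := by
      simpa [hxs0] using hx
    have hy : ys0 = [] := by simp [hys0, hfilter]
    simp [hx, hy]
  | cons m tl =>
    have hxne : xs0 ≠ [] := by
      intro hx
      rw [hx] at hs
      simp [PySem.List.sorted] at hs
    have hyne : ys0 ≠ [] := by
      intro hy
      apply hxne
      have : points.filter (fun p => p.2.2 > 0) = [] := by
        have := congrArg List.length hy
        simpa [hys0] using this
      simp [hxs0, this]
    have hsu : PySem.List.sorted ys0 (fun x => x) false ≠ [] := by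
      intro h; exact hyne ((PySem.List.sorted_eq_nil_iff _ _ _).mp h)
    obtain ⟨m', tl', hu⟩ := List.exists_cons_of_ne_nil hsu
    have hsrne : (PySem.List.sorted xs0 (fun x => x) false).reverse ≠ [] := by
      simp [hs]
    have hurne : (PySem.List.sorted ys0 (fun x => x) false).reverse ≠ [] := by
      simp [hu]
    obtain ⟨M, tr, hr⟩ := List.exists_cons_of_ne_nil hsrne
    obtain ⟨M', tr', hr'⟩ := List.exists_cons_of_ne_nil hurne
    have hlastx : (PySem.List.sorted xs0 (fun x => x) false).getLast? = some M := by
      rw [← List.head?_reverse, hr]; rfl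
      
    have hlasty : (PySem.List.sorted ys0 (fun x => x) false).getLast? = some M' := by
      rw [← List.head?_reverse, hr']; rfl
    rw [hs] at hlastx
    rw [hu] at hlasty
    rw [foldl_min_sorted xs0 l m tl hs, foldl_min_sorted ys0 t m' tl' hu,
        foldl_max_sorted xs0 r M tr hr, foldl_max_sorted ys0 b M' tr' hr']
    simp [hu, hlastx, hlasty]
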